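-- pv_equiv track=rewrite | github.com/Arselena/higher-school | Level_0_8.py | SumOfThe
-- ===== SOURCE A (Python) =====
-- def SumOfThe(N, data):
--     try:
--         assert type(N) is int and N >= 2 and N == len(data)
--         for i in range(len(data)):
--             assert type(data[i]) is int  # Проверяем Элемент массива
--
--         DATA = list(data)
--         SUM = None
--         for i in range(1, N):
--             if DATA[0] == sum(DATA[1:N]):
--                 SUM = DATA[0]
--                 break
--             elif DATA[N-1] == sum(DATA[0:(N-1)]):
--                 SUM = DATA[N-1]
--             else:
--                 DATA[0], DATA[i] = DATA[i], DATA[0]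
--         return SUM
--
--     except AssertionError:
--         pass
-- ===== SOURCE B (Python) =====
-- def SumOfThe(N, data):
--     # Compute the total once; an element x satisfies
--     # x == sum(rest) iff 2*x == S, i.e. (S even and x == S//2); check in A's
--     # effective priority order: data[0], then data[N-1], then data[1..N-2].
--     if type(N) is not int or N < 2 or N != len(data):
--         return None
--     if set(map(type, data)) != {int}:
--         return None
--     S = sum(data)
--     if S % 2:
--         return None
--     h = S // 2
--     if data[0] == h:
--         return data[0]
--     if data[N - 1] == h:
--         return data[N - 1]
--     return h if h in data[1:N - 1] else None
-- ===== Notes on version B (the rewrite author's own statement) =====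
-- stated objective: alternative
-- what changed: A scans with a swap loop that recomputes sum(DATA[1:N]) and sum(DATA[0:N-1]) on every iteration; B computes the total S once, returns None when S is odd, and otherwise checks x == S//2 directly (endpoints, then a membership test on data[1:N-1]) in A's effective priority order.
import Mathlib
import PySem

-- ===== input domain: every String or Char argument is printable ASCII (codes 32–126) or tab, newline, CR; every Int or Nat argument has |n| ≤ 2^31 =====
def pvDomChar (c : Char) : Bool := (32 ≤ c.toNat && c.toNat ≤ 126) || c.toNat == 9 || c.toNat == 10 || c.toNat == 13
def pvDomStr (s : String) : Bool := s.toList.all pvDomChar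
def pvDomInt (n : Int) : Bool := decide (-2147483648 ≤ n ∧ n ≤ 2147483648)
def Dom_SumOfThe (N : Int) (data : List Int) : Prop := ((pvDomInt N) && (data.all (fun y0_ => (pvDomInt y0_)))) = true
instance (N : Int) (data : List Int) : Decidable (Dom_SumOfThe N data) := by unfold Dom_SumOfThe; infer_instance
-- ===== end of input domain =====

-- B replaces A's swap-scan (which recomputes slice sums inside the loop) by one total
-- computed once plus direct half-sum checks in A's effective priority order.

-- ===== PORT A =====
-- the for-loop over range(1, N); state: DATA, SUM.  Python's in-range indexing DATA[0],
-- DATA[N-1], DATA[i] is ported as pyGetD with default 0 — exact, since the assert guard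
-- guarantees N = len(DATA) ≥ 2 and every loop index i ∈ [1, N) is in range.
def sumOfTheLoopA (N : Int) (DATA : List Int) (SUM : Option Int) : List Int → Option Int
  | [] => SUM
  | i :: rest =>
    if PySem.List.pyGetD DATA 0 0 = (PySem.List.slice DATA (some 1) (some N)).sum then
      some (PySem.List.pyGetD DATA 0 0)              -- SUM = DATA[0]; break, then return SUM
    else if PySem.List.pyGetD DATA (N - 1) 0 = (PySem.List.slice DATA (some 0) (some (N - 1))).sum then
      sumOfTheLoopA N DATA (some (PySem.List.pyGetD DATA (N - 1) 0)) rest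
    else                                             -- DATA[0], DATA[i] = DATA[i], DATA[0]
      sumOfTheLoopA N
        ((DATA.set 0 (PySem.List.pyGetD DATA i 0)).set i.toNat (PySem.List.pyGetD DATA 0 0))
        SUM rest

-- A's asserts: 'type(N) is int' and the per-element type checks are trivially true under
-- the Lean types; the value checks N ≥ 2 and N == len(data) remain (AssertionError → None).
def SumOfThe (N : Int) (data : List Int) : Option Int :=
  if 2 ≤ N ∧ N = (data.length : Int) then
    sumOfTheLoopA N data none (PySem.List.pyRange 1 N)
  else none

-- ===== PORT B =====
-- Source B's element type check 'set(map(type, data)) != {int}' is trivially false under the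
-- Lean types; the value checks remain.  'h in data[1:N-1]' is List.contains on the slice.
def SumOfThe_alt (N : Int) (data : List Int) : Option Int :=
  if ¬(2 ≤ N ∧ N = (data.length : Int)) then none
  else
    let S := data.sum
    if PySem.Int.mod S 2 ≠ 0 then none
    else
      let h := PySem.Int.floordiv S 2
      if PySem.List.pyGetD data 0 0 = h then some (PySem.List.pyGetD data 0 0)
      else if PySem.List.pyGetD data (N - 1) 0 = h then some (PySem.List.pyGetD data (N - 1) 0)
      else if (PySem.List.slice data (some 1) (some (N - 1))).contains h then some h
      else none

-- ===== PRECONDITION & SPEC =====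
def Spec_SumOfThe (N : Int) (data : List Int) (out : Option Int) : Prop := out = SumOfThe_alt N data
instance (N : Int) (data : List Int) (out : Option Int) : Decidable (Spec_SumOfThe N data out) := by unfold Spec_SumOfThe; infer_instance

-- ===== CLAIM (what is proved, stated in full; the proofs are below) =====
def Claim_equal_SumOfThe : Prop := ∀ (N : Int) (data : List Int), Dom_SumOfThe N data → Spec_SumOfThe N data (SumOfThe N data)

-- ===== LEMMAS AND PROOFS =====

-- Proof-side characterisation of A's swap phase: first element x of xs with 2*x = S.
def findHalfB (S : Int) : List Int → Option Int
  | [] => none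
  | x :: xs => if 2 * x = S then some x else findHalfB S xs

lemma findHalfB_odd (S : Int) (hS : PySem.Int.mod S 2 ≠ 0) :
    ∀ xs : List Int, findHalfB S xs = none
  | [] => rfl
  | x :: xs => by
    simp only [findHalfB]
    rw [if_neg (fun he => hS ((PySem.Int.mod_eq_zero_iff_dvd S 2).mpr ⟨x, he.symm⟩)),
        findHalfB_odd S hS xs]

lemma findHalfB_even (h : Int) :
    ∀ xs : List Int, findHalfB (2 * h) xs = if xs.contains h then some h else none
  | [] => rfl
  | x :: xs => by
    simp only [findHalfB, List.contains_cons]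
    by_cases hx : x = h
    · subst hx; simp
    · rw [if_neg (by omega), findHalfB_even h xs]
      simp [beq_iff_eq, Ne.symm hx]

-- Entering iteration i = k+1 of A's loop (k swaps done), DATA has this shape.
def shapeK (data : List Int) (k : Nat) : List Int :=
  data.getD k 0 :: data.take k ++ data.drop (k + 1)

lemma shape_len (data : List Int) (k : Nat) (hk : k < data.length) :
    (shapeK data k).length = data.length := by
  simp [shapeK]; omega

lemma shape_sum (data : List Int) (k : Nat) (hk : k < data.length) :
    (shapeK data k).sum = data.sum := by
  simp only [shapeK, List.sum_cons, List.sum_append]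
  conv_rhs => rw [← List.take_append_drop k data, List.drop_eq_getElem_cons hk]
  rw [List.getD_eq_getElem data 0 hk]
  simp only [List.sum_append, List.sum_cons]
  ring

lemma shape_get0 (data : List Int) (k : Nat) (hk : k < data.length) :
    PySem.List.pyGetD (shapeK data k) 0 0 = data[k] := by
  rw [PySem.List.pyGetD_eq_getElem _ _ (by omega) (by rw [shape_len data k hk]; omega)]
  simp [shapeK, List.getElem?_eq_getElem hk]

lemma shape_get_high (data : List Int) (k j : Nat) (hkj : k + 1 ≤ j) (hj : j < data.length) :
    (shapeK data k)[j]'(by rw [shape_len data k (by omega)]; omega) = data[j] := by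
  obtain ⟨j', rfl⟩ : ∃ j', j = j' + 1 := ⟨j - 1, by omega⟩
  simp only [shapeK]
  rw [List.getElem_append_right (by simp; omega)]
  rw [List.getElem_drop]
  congr 1
  simp; omega

lemma slice1_shape (data : List Int) (k : Nat) (hk : k < data.length) :
    (PySem.List.slice (shapeK data k) (some 1) (some (data.length : Int))).sum
      = data.sum - data[k] := by
  rw [PySem.List.slice_toNat _ (by omega) (by omega)]
  have h1 : ((data.length : Int)).toNat = data.length := by omega
  have h2 : ((1:Int)).toNat = 1 := by omega
  rw [h1, h2]
  have hdrop : (shapeK data k).drop 1 = data.take k ++ data.drop (k+1) := by simp [shapeK]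
  rw [hdrop, List.take_of_length_le (by simp; omega)]
  have hs := shape_sum data k hk
  simp only [shapeK, List.sum_cons, List.sum_append, List.getD_eq_getElem data 0 hk] at hs
  rw [List.sum_append]
  omega

lemma shape_getlast (data : List Int) (k : Nat) (hk : k + 1 < data.length) :
    PySem.List.pyGetD (shapeK data k) ((data.length : Int) - 1) 0
      = data[data.length - 1]'(by omega) := by
  have hcast : ((data.length : Int)) - 1 = ((data.length - 1 : Nat) : Int) := by omega
  rw [hcast, PySem.List.pyGetD_natCast,
      List.getD_eq_getElem _ 0 (by rw [shape_len data k (by omega)]; omega)]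
  exact shape_get_high data k (data.length - 1) (by omega) (by omega)

lemma slice0_shape (data : List Int) (k : Nat) (hk : k + 1 < data.length) :
    (PySem.List.slice (shapeK data k) (some 0) (some ((data.length : Int) - 1))).sum
      = data.sum - data[data.length - 1]'(by omega) := by
  rw [PySem.List.slice_toNat _ (by omega) (by omega)]
  have h1 : ((data.length : Int) - 1).toNat = data.length - 1 := by omega
  rw [h1]
  simp only [Int.toNat_zero, Nat.sub_zero, List.drop_zero]
  have hlen : (shapeK data k).length = data.length := shape_len data k (by omega)
  have hdrop : (shapeK data k).drop (data.length - 1)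
      = [data[data.length - 1]'(by omega)] := by
    rw [List.drop_eq_getElem_cons (by omega)]
    rw [List.drop_eq_nil_of_le (by omega)]
    rw [shape_get_high data k (data.length - 1) (by omega) (by omega)]
  have hsum := shape_sum data k (by omega)
  have hsplit : ((shapeK data k).take (data.length - 1)).sum
      + ((shapeK data k).drop (data.length - 1)).sum = (shapeK data k).sum := by
    rw [← List.sum_append, List.take_append_drop]
  rw [hdrop] at hsplit
  simp only [List.sum_cons, List.sum_nil] at hsplit
  omega

lemma shape_getmid (data : List Int) (k : Nat) (hk : k + 1 < data.length) :
    PySem.List.pyGetD (shapeK data k) ((k : Int) + 1) 0 = data[k + 1] := by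
  have hcast : ((k : Int)) + 1 = (((k + 1 : Nat)) : Int) := by omega
  rw [hcast, PySem.List.pyGetD_natCast,
      List.getD_eq_getElem _ 0 (by rw [shape_len data k (by omega)]; omega)]
  exact shape_get_high data k (k + 1) (by omega) (by omega)

lemma set_append_len {α : Type} (l1 l2 : List α) (k : Nat) (h : l1.length = k) (a : α) :
    (l1 ++ l2).set k a = l1 ++ l2.set 0 a := by
  subst h; simp

-- A's swap at i = k+1 turns the iteration-(k+1) shape into the iteration-(k+2) shape.
lemma shape_swap (data : List Int) (k : Nat) (hk : k + 1 < data.length) :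
    ((shapeK data k).set 0 (data[k + 1]'(by omega))).set (k + 1) (data[k]'(by omega))
      = shapeK data (k + 1) := by
  rw [show shapeK data k = data.getD k 0 :: (data.take k ++ data.drop (k + 1)) from rfl]
  rw [List.set_cons_zero, List.set_cons_succ]
  rw [set_append_len _ _ k (by simp; omega)]
  rw [List.drop_eq_getElem_cons hk, List.set_cons_zero]
  have htake : data.take (k + 1) = data.take k ++ [data[k]] := by
    rw [List.take_add_one]
    simp [List.getElem?_eq_getElem (by omega : k < data.length)]
  rw [show shapeK data (k+1) = data.getD (k+1) 0 :: (data.take (k+1) ++ data.drop (k + 1 + 1)) from rfl]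
  rw [List.getD_eq_getElem data 0 (show k + 1 < data.length by omega), htake]
  simp only [List.append_assoc, List.singleton_append]

-- Once the elif has fired (DATA unchanged, both conditions stable), every later iteration
-- rewrites SUM with the same value: the loop returns some DATA[N-1].
lemma loop_frozen (N : Int) (DATA : List Int) (is : List Int)
    (h1 : ¬ PySem.List.pyGetD DATA 0 0 = (PySem.List.slice DATA (some 1) (some N)).sum)
    (h2 : PySem.List.pyGetD DATA (N - 1) 0 = (PySem.List.slice DATA (some 0) (some (N - 1))).sum) :
    sumOfTheLoopA N DATA (some (PySem.List.pyGetD DATA (N - 1) 0)) is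
      = some (PySem.List.pyGetD DATA (N - 1) 0) := by
  induction is with
  | nil => rfl
  | cons i rest ih =>
    simp only [sumOfTheLoopA]
    rw [if_neg h1, if_pos h2, ih]

-- Swap-phase invariant: entering iteration k+1 with DATA = shapeK data k and no SUM yet,
-- as long as the last element is not half the total, the loop computes the first
-- half-total element among data[k], …, data[len-2].
lemma loop_swap (data : List Int) (m : Nat) : ∀ (k : Nat), k + m + 1 = data.length →
    2 * data.getD (data.length - 1) 0 ≠ data.sum →
    sumOfTheLoopA (data.length : Int) (shapeK data k) none
        (PySem.List.pyRange ((k : Int) + 1) (data.length : Int)) =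
      findHalfB data.sum ((data.take (data.length - 1)).drop k) := by
  induction m with
  | zero =>
    intro k hk _
    rw [PySem.List.pyRange_one_eq_nil (by omega)]
    rw [List.drop_eq_nil_of_le (by simp; omega)]
    rfl
  | succ m ih =>
    intro k hk hlast
    have hk0 : k < data.length := by omega
    have hk1 : k + 1 < data.length := by omega
    have hlast' : 2 * data[data.length - 1]'(by omega) ≠ data.sum := by
      rw [List.getD_eq_getElem data 0 (by omega)] at hlast; exact hlast
    rw [PySem.List.pyRange_one_cons (by omega : ((k : Int) + 1) < (data.length : Int))]
    simp only [sumOfTheLoopA]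
    rw [shape_get0 data k hk0, slice1_shape data k hk0,
        shape_getlast data k hk1, slice0_shape data k hk1,
        shape_getmid data k hk1]
    rw [show ((k : Int) + 1).toNat = k + 1 by omega]
    -- the elif condition is false throughout the swap phase
    have hne : ¬ (data[data.length - 1]'(by omega)
        = data.sum - data[data.length - 1]'(by omega)) := by omega
    rw [if_neg hne]
    -- unfold one step of the target scan
    rw [List.drop_eq_getElem_cons (show k < (data.take (data.length - 1)).length by simp; omega)]
    rw [List.getElem_take]
    by_cases hc : 2 * data[k] = data.sum
    · rw [if_pos (by omega : data[k] = data.sum - data[k])]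
      simp only [findHalfB]
      rw [if_pos hc]
    · rw [if_neg (by omega : ¬ (data[k] = data.sum - data[k]))]
      rw [shape_swap data k hk1]
      have IH := ih (k + 1) (by omega) hlast
      push_cast at IH
      rw [IH]
      simp only [findHalfB]
      rw [if_neg hc]

-- ===== VERDICT (by name: the statement is the Claim_ definition above) =====
theorem SumOfThe_spec : Claim_equal_SumOfThe := by
  intro N data _
  unfold Spec_SumOfThe SumOfThe SumOfThe_alt
  by_cases hg : 2 ≤ N ∧ N = (data.length : Int)
  · obtain ⟨h2, hN⟩ := hg
    subst hN
    rw [if_pos ⟨h2, rfl⟩, if_neg (not_not_intro ⟨h2, rfl⟩)]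
    dsimp only
    have hL : 2 ≤ data.length := by omega
    have h0 : 0 < data.length := by omega
    have hlt : data.length - 1 < data.length := by omega
    have hdata0 : data = shapeK data 0 := by
      simp only [shapeK, List.take_zero, Nat.zero_add]
      rw [List.getD_eq_getElem data 0 h0]
      have h := List.drop_eq_getElem_cons h0
      rw [List.drop_zero] at h
      exact h
    have g0 : PySem.List.pyGetD data 0 0 = data[0] := by
      nth_rewrite 1 [hdata0]; exact shape_get0 data 0 h0
    have s1 : (PySem.List.slice data (some 1) (some (data.length : Int))).sum
        = data.sum - data[0] := by
      nth_rewrite 1 [hdata0]; exact slice1_shape data 0 h0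
    have glast : PySem.List.pyGetD data ((data.length : Int) - 1) 0
        = data[data.length - 1]'(by omega) := by
      nth_rewrite 1 [hdata0]; exact shape_getlast data 0 (by omega)
    have s0 : (PySem.List.slice data (some 0) (some ((data.length : Int) - 1))).sum
        = data.sum - data[data.length - 1]'(by omega) := by
      nth_rewrite 1 [hdata0]; exact slice0_shape data 0 (by omega)
    by_cases hpar : PySem.Int.mod data.sum 2 = 0
    · -- even total: h = S // 2, and 2*x = S iff x = h
      obtain ⟨h, hS⟩ : ∃ h, data.sum = 2 * h :=
        (PySem.Int.mod_eq_zero_iff_dvd data.sum 2).mp hpar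
      have hfd : PySem.Int.floordiv data.sum 2 = h :=
        (PySem.Int.floordiv_eq_iff_of_pos (by omega)).mpr ⟨by omega, by omega⟩
      rw [if_neg (not_not_intro hpar), hfd, g0, glast]
      by_cases hc1 : (2:Int) * data[0]'h0 = data.sum
      · rw [PySem.List.pyRange_one_cons (by omega : (1 : Int) < (data.length : Int))]
        simp only [sumOfTheLoopA]
        rw [g0, s1]
        rw [if_pos (by omega : data[0]'h0 = data.sum - data[0]'h0)]
        rw [if_pos (by omega : data[0]'h0 = h)]
      · by_cases hc2 : (2:Int) * data[data.length - 1]'(by omega) = data.sum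
        · rw [PySem.List.pyRange_one_cons (by omega : (1 : Int) < (data.length : Int))]
          simp only [sumOfTheLoopA]
          have h1' : ¬ PySem.List.pyGetD data 0 0
              = (PySem.List.slice data (some 1) (some (data.length : Int))).sum := by
            rw [g0, s1]; omega
          have h2' : PySem.List.pyGetD data ((data.length : Int) - 1) 0
              = (PySem.List.slice data (some 0) (some ((data.length : Int) - 1))).sum := by
            rw [glast, s0]; omega
          have hf := loop_frozen (data.length : Int) data
            (PySem.List.pyRange (1 + 1) (data.length : Int)) h1' h2'
          rw [if_neg h1', if_pos h2', hf, glast]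
          rw [if_neg (by omega : ¬ data[0]'h0 = h)]
          rw [if_pos (by omega : data[data.length - 1]'hlt = h)]
        · -- swap phase on both sides
          have hlastD : 2 * data.getD (data.length - 1) 0 ≠ data.sum := by
            rw [List.getD_eq_getElem data 0 (by omega)]; exact hc2
          have L0 := loop_swap data (data.length - 1) 0 (by omega) hlastD
          rw [← hdata0] at L0
          norm_num at L0
          rw [L0]
          rw [if_neg (by omega : ¬ data[0]'h0 = h)]
          rw [if_neg (by omega : ¬ data[data.length - 1]'hlt = h)]
          have ht : data.take (data.length - 1)
              = data[0] :: (data.take (data.length - 1)).drop 1 := by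
            have h := List.drop_eq_getElem_cons
              (show 0 < (data.take (data.length - 1)).length by simp; omega)
            rw [List.drop_zero, List.getElem_take] at h
            exact h
          rw [ht, hS, findHalfB_even]
          rw [PySem.List.slice_toNat data (by omega) (by omega)]
          rw [show ((data.length : Int) - 1).toNat = data.length - 1 by omega,
              show ((1 : Int)).toNat = 1 from rfl]
          rw [← List.drop_take]
          simp only [List.contains_cons]
          rw [show (h == data[0]'h0) = false from beq_eq_false_iff_ne.mpr (by omega)]
          simp
    · -- odd total: no element can equal the sum of the others
      rw [if_pos hpar]
      have hc2 : ¬ (2:Int) * data[data.length - 1]'(by omega) = data.sum := fun he =>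
        hpar ((PySem.Int.mod_eq_zero_iff_dvd data.sum 2).mpr ⟨data[data.length - 1]'(by omega), he.symm⟩)
      have hlastD : 2 * data.getD (data.length - 1) 0 ≠ data.sum := by
        rw [List.getD_eq_getElem data 0 (by omega)]; exact hc2
      have L0 := loop_swap data (data.length - 1) 0 (by omega) hlastD
      rw [← hdata0] at L0
      norm_num at L0
      rw [L0]
      exact findHalfB_odd data.sum hpar _
  · rw [if_neg hg, if_pos hg]
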